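-- pv_equiv track=rewrite | github.com/hattum/ijwit | Miro/priority_miro_best.py | scoreH
-- ===== SOURCE A (Python) =====
-- def scoreH(child):
--     scoreH = 0
--     scoreC = 0
--     for i in range(len(child)):
--         current = child[i][1]
--         for j in range(i+2, len(child)):
--             next = child[j][1]
--             if current[0] == next[0] and (current[1] == next[1] - 1 or current[1] == next[1] +1) and child[i][0] == "H" and child[j][0] == "H":
--                 scoreH += -1
--             elif current[0] == next[0] and (current[1] == next[1] - 1 or current[1] == next[1] +1) and child[i][0] == "C" and child[j][0] == "C":
--                 scoreC += -5
--             elif current[1] == next[1] and (current[0] == next[0] - 1 or current[0] == next[0] +1) and child[i][0] == "H" and child[j][0] == "H":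
--                 scoreH += -1
--             elif current[1] == next[1] and (current[0] == next[0] - 1 or current[0] == next[0] +1) and child[i][0] == "C" and child[j][0] == "C":
--                 scoreC += -5
--     return scoreH + scoreC
-- ===== SOURCE B (Python) =====
-- def scoreH(child):
--     counts = {}
--     total = 0
--     prev1 = None  # last element seen
--     prev2 = None  # element seen two steps back
--     for elem in child:
--         if prev2 is not None:
--             counts[prev2] = counts.get(prev2, 0) + 1
--         letter, (x, y) = elem
--         if letter == "H":
--             w = -1
--         elif letter == "C":
--             w = -5
--         else:
--             w = 0
--         if w != 0:
--             for nb in ((x + 1, y), (x - 1, y), (x, y + 1), (x, y - 1)):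
--                 total += w * counts.get((letter, nb), 0)
--         prev2 = prev1
--         prev1 = elem
--     return total
-- ===== Notes on version B (the rewrite author's own statement) =====
-- stated objective: faster
-- what changed: Replaced the O(n^2) all-pairs double loop with a single pass that keeps a hash map counting elements seen at least two positions back and, for each element, looks up only its 4 grid neighbours with a matching letter.
import Mathlib
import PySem

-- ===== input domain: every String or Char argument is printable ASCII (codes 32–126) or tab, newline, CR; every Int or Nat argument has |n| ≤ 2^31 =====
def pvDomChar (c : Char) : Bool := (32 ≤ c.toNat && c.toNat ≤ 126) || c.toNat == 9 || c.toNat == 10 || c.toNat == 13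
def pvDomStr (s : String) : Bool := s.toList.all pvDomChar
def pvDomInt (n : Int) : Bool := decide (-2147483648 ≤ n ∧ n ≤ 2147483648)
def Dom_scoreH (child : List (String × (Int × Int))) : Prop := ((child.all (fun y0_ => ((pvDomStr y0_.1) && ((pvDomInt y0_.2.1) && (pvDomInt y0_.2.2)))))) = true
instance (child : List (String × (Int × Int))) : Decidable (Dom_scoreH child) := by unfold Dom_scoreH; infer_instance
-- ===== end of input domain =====

-- B replaces A's O(n^2) all-pairs double loop by one pass with a hash map of earlier
-- elements (two positions back), looking up only the 4 grid neighbours of each element.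

-- ===== PORT A =====
-- literal transliteration of A's nested index loops; indices are always in range,
-- so the pyGetD default ("", (0, 0)) is never read
def scoreH (child : List (String × (Int × Int))) : Int :=
  let st := (PySem.List.pyRange 0 (PySem.List.len child) 1).foldl (fun (st : Int × Int) i =>
    let current := (PySem.List.pyGetD child i ("", (0, 0))).2
    (PySem.List.pyRange (i + 2) (PySem.List.len child) 1).foldl (fun (st : Int × Int) j =>
      let next := (PySem.List.pyGetD child j ("", (0, 0))).2
      if current.1 = next.1 ∧ (current.2 = next.2 - 1 ∨ current.2 = next.2 + 1) ∧
          (PySem.List.pyGetD child i ("", (0, 0))).1 = "H" ∧ (PySem.List.pyGetD child j ("", (0, 0))).1 = "H" then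
        (st.1 + -1, st.2)
      else if current.1 = next.1 ∧ (current.2 = next.2 - 1 ∨ current.2 = next.2 + 1) ∧
          (PySem.List.pyGetD child i ("", (0, 0))).1 = "C" ∧ (PySem.List.pyGetD child j ("", (0, 0))).1 = "C" then
        (st.1, st.2 + -5)
      else if current.2 = next.2 ∧ (current.1 = next.1 - 1 ∨ current.1 = next.1 + 1) ∧
          (PySem.List.pyGetD child i ("", (0, 0))).1 = "H" ∧ (PySem.List.pyGetD child j ("", (0, 0))).1 = "H" then
        (st.1 + -1, st.2)
      else if current.2 = next.2 ∧ (current.1 = next.1 - 1 ∨ current.1 = next.1 + 1) ∧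
          (PySem.List.pyGetD child i ("", (0, 0))).1 = "C" ∧ (PySem.List.pyGetD child j ("", (0, 0))).1 = "C" then
        (st.1, st.2 + -5)
      else st) st) ((0 : Int), (0 : Int))
  st.1 + st.2

-- ===== PORT B =====
-- literal transliteration of Source B: state = (counts dict, prev1, prev2, total)
def scoreH_alt (child : List (String × (Int × Int))) : Int :=
  let st := child.foldl
    (fun (st : PySem.Dict (String × (Int × Int)) Int × Option (String × (Int × Int)) × Option (String × (Int × Int)) × Int) elem =>
      let counts := match st.2.2.1 with
        | some v => st.1.insert v (st.1.getD v 0 + 1)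
        | none => st.1
      let letter := elem.1
      let x := elem.2.1
      let y := elem.2.2
      let w : Int := if letter = "H" then -1 else if letter = "C" then -5 else 0
      let total := if w ≠ 0 then
          ([(x + 1, y), (x - 1, y), (x, y + 1), (x, y - 1)] : List (Int × Int)).foldl
            (fun tot nb => tot + w * counts.getD (letter, nb) 0) st.2.2.2
        else st.2.2.2
      (counts, some elem, st.2.1, total))
    (PySem.Dict.empty, none, none, 0)
  st.2.2.2

-- ===== PRECONDITION & SPEC =====
def Spec_scoreH (child : List (String × (Int × Int))) (out : Int) : Prop := out = scoreH_alt child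
instance (child : List (String × (Int × Int))) (out : Int) : Decidable (Spec_scoreH child out) := by unfold Spec_scoreH; infer_instance

-- ===== CLAIM (what is proved, stated in full; the proofs are below) =====
def Claim_equal_scoreH : Prop := ∀ (child : List (String × (Int × Int))), Dom_scoreH child → Spec_scoreH child (scoreH child)

-- ===== LEMMAS AND PROOFS =====

-- per-pair penalty, split exactly as A's if/elif chain splits it over the two accumulators
def penH (a b : String × (Int × Int)) : Int :=
  if a.2.1 = b.2.1 ∧ (a.2.2 = b.2.2 - 1 ∨ a.2.2 = b.2.2 + 1) ∧ a.1 = "H" ∧ b.1 = "H" then -1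
  else if a.2.1 = b.2.1 ∧ (a.2.2 = b.2.2 - 1 ∨ a.2.2 = b.2.2 + 1) ∧ a.1 = "C" ∧ b.1 = "C" then 0
  else if a.2.2 = b.2.2 ∧ (a.2.1 = b.2.1 - 1 ∨ a.2.1 = b.2.1 + 1) ∧ a.1 = "H" ∧ b.1 = "H" then -1
  else 0
def penC (a b : String × (Int × Int)) : Int :=
  if a.2.1 = b.2.1 ∧ (a.2.2 = b.2.2 - 1 ∨ a.2.2 = b.2.2 + 1) ∧ a.1 = "H" ∧ b.1 = "H" then 0
  else if a.2.1 = b.2.1 ∧ (a.2.2 = b.2.2 - 1 ∨ a.2.2 = b.2.2 + 1) ∧ a.1 = "C" ∧ b.1 = "C" then -5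
  else if a.2.2 = b.2.2 ∧ (a.2.1 = b.2.1 - 1 ∨ a.2.1 = b.2.1 + 1) ∧ a.1 = "H" ∧ b.1 = "H" then 0
  else if a.2.2 = b.2.2 ∧ (a.2.1 = b.2.1 - 1 ∨ a.2.1 = b.2.1 + 1) ∧ a.1 = "C" ∧ b.1 = "C" then -5
  else 0
def pen (a b : String × (Int × Int)) : Int := penH a b + penC a b
def T : List (String × (Int × Int)) → Int
  | [] => 0
  | a :: rest => ((rest.drop 1).map (fun b => pen a b)).sum + T rest

def wgt (s : String) : Int := if s = "H" then -1 else if s = "C" then -5 else 0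
def nbrs (e : String × (Int × Int)) : List (Int × Int) :=
  [(e.2.1 + 1, e.2.2), (e.2.1 - 1, e.2.2), (e.2.1, e.2.2 + 1), (e.2.1, e.2.2 - 1)]

lemma pen_eq_nbrs (a e : String × (Int × Int)) :
    pen a e = ((nbrs e).map (fun nb => wgt e.1 * (if a = (e.1, nb) then 1 else 0))).sum := by
  rcases a with ⟨s, u, v⟩; rcases e with ⟨L, x, y⟩
  simp only [pen, penH, penC, nbrs, wgt, List.map_cons, List.map_nil, List.sum_cons,
    List.sum_nil, Prod.mk.injEq]
  split_ifs <;> simp_all <;> omega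


lemma sum_pen_eq_counts (q : List (String × (Int × Int))) (e : String × (Int × Int)) :
    (q.map (fun a => pen a e)).sum
      = ((nbrs e).map (fun nb => wgt e.1 * (q.count (e.1, nb) : Int))).sum := by
  induction q with
  | nil => simp
  | cons a q ih =>
    simp only [List.map_cons, List.sum_cons, ih, List.count_cons, pen_eq_nbrs a e,
      beq_iff_eq, nbrs, List.map_cons, List.map_nil, List.sum_cons, List.sum_nil]
    push_cast
    ring

lemma T_append (p : List (String × (Int × Int))) (e : String × (Int × Int)) :
    T (p ++ [e]) = T p + ((p.dropLast).map (fun a => pen a e)).sum := by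
  induction p with
  | nil => simp [T]
  | cons a p ih =>
    cases p with
    | nil => simp [T]
    | cons b p' =>
      simp only [List.cons_append, T, List.drop_succ_cons, List.drop_zero, List.map_append,
        List.sum_append, List.map_cons, List.sum_cons, List.map_nil, List.sum_nil] at ih ⊢
      simp only [List.dropLast_cons₂, List.map_cons, List.sum_cons] at ih ⊢
      rw [ih]
      ring

lemma sum_rows (child : List (String × (Int × Int))) : ∀ (m k : Nat), child.length - k = m →
    ((PySem.List.pyRange (k : Int) (PySem.List.len child) 1).map (fun i =>
        ((PySem.List.pyRange (i + 2) (PySem.List.len child) 1).map (fun j =>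
          pen (PySem.List.pyGetD child i ("", (0, 0))) (PySem.List.pyGetD child j ("", (0, 0))))).sum)).sum
      = T (child.drop k) := by
  intro m
  induction m with
  | zero =>
    intro k hk
    have hlen : child.length ≤ k := by omega
    rw [PySem.List.pyRange_one_eq_nil (by simp [PySem.List.len]; exact_mod_cast hlen)]
    rw [List.drop_eq_nil_of_le hlen]
    simp [T]
  | succ m ih =>
    intro k hk
    have hklt : k < child.length := by omega
    rw [PySem.List.pyRange_one_cons (by simp [PySem.List.len]; exact_mod_cast hklt)]
    rw [List.map_cons, List.sum_cons]
    have hcast1 : (k : Int) + 1 = ((k + 1 : Nat) : Int) := by push_cast; ring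
    have hcast2 : (k : Int) + 2 = ((k + 2 : Nat) : Int) := by push_cast; ring
    rw [hcast1, ih (k + 1) (by omega)]
    -- inner sum for row k
    have hmm : (PySem.List.pyRange ((k : Int) + 2) (PySem.List.len child) 1).map (fun j =>
          pen (PySem.List.pyGetD child (k : Int) ("", (0, 0))) (PySem.List.pyGetD child j ("", (0, 0))))
        = ((PySem.List.pyRange ((k : Int) + 2) (PySem.List.len child) 1).map (fun j =>
            PySem.List.pyGetD child j ("", (0, 0)))).map (fun b =>
              pen (PySem.List.pyGetD child (k : Int) ("", (0, 0))) b) := by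
      rw [List.map_map]; rfl
    rw [hmm]
    have hlen' : PySem.List.len child = ((child.length : Nat) : Int) := by simp [PySem.List.len]
    rw [hlen', PySem.List.map_pyGetD_pyRange' child ("", (0, 0)) (by positivity)]
    have htoNat : ((k : Int) + 2).toNat = k + 2 := by omega
    rw [htoNat]
    -- head element
    rw [PySem.List.pyGetD_natCast, List.getD_eq_getElem _ _ hklt]
    -- T on drop k
    rw [List.drop_eq_getElem_cons hklt, T]
    have : (List.drop (k + 1) child).drop 1 = List.drop (k + 2) child := by
      rw [List.drop_drop]
    rw [this]

lemma A_eq_T (child : List (String × (Int × Int))) : scoreH child = T child := by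
  unfold scoreH
  simp only []
  rw [PySem.List.foldl_congr_mem _ _ (fun (st : Int × Int) i =>
      (st.1 + ((PySem.List.pyRange (i + 2) (PySem.List.len child) 1).map (fun j =>
          penH (PySem.List.pyGetD child i ("", (0, 0))) (PySem.List.pyGetD child j ("", (0, 0))))).sum,
       st.2 + ((PySem.List.pyRange (i + 2) (PySem.List.len child) 1).map (fun j =>
          penC (PySem.List.pyGetD child i ("", (0, 0))) (PySem.List.pyGetD child j ("", (0, 0))))).sum)) _ ?hout]
  case hout =>
    intro acc i _
    rw [PySem.List.foldl_congr_mem _ _ (fun (st : Int × Int) j =>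
        (st.1 + penH (PySem.List.pyGetD child i ("", (0, 0))) (PySem.List.pyGetD child j ("", (0, 0))),
         st.2 + penC (PySem.List.pyGetD child i ("", (0, 0))) (PySem.List.pyGetD child j ("", (0, 0))))) _ ?hin]
    case hin =>
      intro st j _
      simp only [penH, penC]
      split_ifs <;> simp
    rw [PySem.List.foldl_prod_mk
      (f := fun s j => s + penH (PySem.List.pyGetD child i ("", (0, 0))) (PySem.List.pyGetD child j ("", (0, 0))))
      (g := fun s j => s + penC (PySem.List.pyGetD child i ("", (0, 0))) (PySem.List.pyGetD child j ("", (0, 0))))]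
    rw [PySem.List.foldl_add, PySem.List.foldl_add]
  rw [PySem.List.foldl_prod_mk
    (f := fun (s : Int) i => s + ((PySem.List.pyRange (i + 2) (PySem.List.len child) 1).map (fun j =>
        penH (PySem.List.pyGetD child i ("", (0, 0))) (PySem.List.pyGetD child j ("", (0, 0))))).sum)
    (g := fun (s : Int) i => s + ((PySem.List.pyRange (i + 2) (PySem.List.len child) 1).map (fun j =>
        penC (PySem.List.pyGetD child i ("", (0, 0))) (PySem.List.pyGetD child j ("", (0, 0))))).sum)]
  rw [PySem.List.foldl_add, PySem.List.foldl_add]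
  dsimp only
  rw [zero_add, zero_add]
  simp only [PySem.List.len_eq]
  have h0 := sum_rows child child.length 0 (by omega)
  simp only [Nat.cast_zero, List.drop_zero, PySem.List.len_eq] at h0
  rw [← h0, ← PySem.List.sum_map_add_int]
  apply congrArg List.sum
  apply List.map_congr_left
  intro i _
  simp only [pen]
  rw [PySem.List.sum_map_add_int]

def cD (q : List (String × (Int × Int))) : PySem.Dict (String × (Int × Int)) Int :=
  q.foldl (fun d a => d.insert a (d.getD a 0 + 1)) PySem.Dict.empty

lemma cD_getD (q : List (String × (Int × Int))) (k : String × (Int × Int)) :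
    (cD q).getD k 0 = (q.count k : Int) := by
  unfold cD
  rw [PySem.Dict.getD_foldl_insert_add_one]
  simp

lemma contrib (q : List (String × (Int × Int))) (letter : String) (x y t : Int) :
    (if (if letter = "H" then (-1 : Int) else if letter = "C" then -5 else 0) ≠ 0 then
        ([(x + 1, y), (x - 1, y), (x, y + 1), (x, y - 1)] : List (Int × Int)).foldl
          (fun tot nb => tot + (if letter = "H" then (-1 : Int) else if letter = "C" then -5 else 0)
            * (cD q).getD (letter, nb) 0) t
      else t)
    = t + (q.map (fun a => pen a (letter, (x, y)))).sum := by
  rw [sum_pen_eq_counts q (letter, (x, y))]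
  simp only [nbrs, wgt, List.map_cons, List.map_nil, List.sum_cons, List.sum_nil]
  split_ifs <;>
    first
      | (simp only [List.foldl_cons, List.foldl_nil, cD_getD]
         ring)
      | omega

lemma B_inv (p : List (String × (Int × Int))) :
    p.foldl
      (fun (st : PySem.Dict (String × (Int × Int)) Int × Option (String × (Int × Int)) × Option (String × (Int × Int)) × Int) elem =>
        let counts := match st.2.2.1 with
          | some v => st.1.insert v (st.1.getD v 0 + 1)
          | none => st.1
        let letter := elem.1
        let x := elem.2.1
        let y := elem.2.2
        let w : Int := if letter = "H" then -1 else if letter = "C" then -5 else 0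
        let total := if w ≠ 0 then
            ([(x + 1, y), (x - 1, y), (x, y + 1), (x, y - 1)] : List (Int × Int)).foldl
              (fun tot nb => tot + w * counts.getD (letter, nb) 0) st.2.2.2
          else st.2.2.2
        (counts, some elem, st.2.1, total))
      (PySem.Dict.empty, none, none, 0)
    = (cD p.dropLast.dropLast, p.getLast?, p.dropLast.getLast?, T p) := by
  induction p using List.reverseRecOn with
  | nil => rfl
  | append_singleton p e ih =>
    rw [List.foldl_append, ih, List.foldl_cons, List.foldl_nil]
    obtain ⟨letter, x, y⟩ := e
    dsimp only
    rw [List.dropLast_concat, List.getLast?_concat, T_append]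
    rcases hL : p.dropLast.getLast? with _ | v
    · have hnil : p.dropLast = [] := List.getLast?_eq_none_iff.mp hL
      simp only [hnil, List.dropLast_nil]
      rw [contrib [] letter x y (T p)]
    · obtain ⟨q', hq⟩ := List.getLast?_eq_some_iff.mp hL
      dsimp only
      have hcounts : (cD p.dropLast.dropLast).insert v ((cD p.dropLast.dropLast).getD v 0 + 1)
          = cD p.dropLast := by
        rw [hq, List.dropLast_concat]
        unfold cD
        rw [List.foldl_append, List.foldl_cons, List.foldl_nil]
      rw [hcounts, contrib p.dropLast letter x y (T p)]

lemma B_eq_T (child : List (String × (Int × Int))) : scoreH_alt child = T child := by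
  unfold scoreH_alt
  simp only []
  rw [B_inv]

-- ===== VERDICT (by name: the statement is the Claim_ definition above) =====
theorem scoreH_spec : Claim_equal_scoreH := by
  intro child _
  unfold Spec_scoreH
  rw [A_eq_T, B_eq_T]
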